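-- pv_equiv track=rewrite | github.com/sakshi900600/Skill-Xcelerator-Program | Contests/contest-2/larrys_arr.py | larrysArray
-- ===== SOURCE A (Python) =====
-- def larrysArray(A):
--     # Write your code here
--     count = 0
--     n = len(A)
--
-- #     counting inversions
--     for i in range(n):
--         for j in range(i):
--             if A[j] > A[i]:
--                 count += 1
--
--     if count % 2 == 0:
--         return "YES"
--     else:
--         return "NO"
-- ===== SOURCE B (Python) =====
-- def larrysArray(A):
--     # Count inversions with a merge sort (O(n log n)) and test the parity.
--     def sort_count(xs):
--         n = len(xs)
--         if n < 2:
--             return xs, 0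
--         mid = n // 2
--         left, cl = sort_count(xs[:mid])
--         right, cr = sort_count(xs[mid:])
--         merged = []
--         i = j = ci = 0
--         while i < len(left) and j < len(right):
--             if left[i] <= right[j]:
--                 merged.append(left[i])
--                 i += 1
--             else:
--                 merged.append(right[j])
--                 j += 1
--                 ci += len(left) - i
--         merged.extend(left[i:])
--         merged.extend(right[j:])
--         return merged, cl + cr + ci
--     _, count = sort_count(A)
--     return "YES" if count % 2 == 0 else "NO"
-- ===== Notes on version B (the rewrite author's own statement) =====
-- stated objective: faster
-- what changed: Replaced the O(n^2) nested-loop inversion counter with a recursive merge sort that counts cross inversions during each merge, then tests the same parity.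
import Mathlib
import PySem

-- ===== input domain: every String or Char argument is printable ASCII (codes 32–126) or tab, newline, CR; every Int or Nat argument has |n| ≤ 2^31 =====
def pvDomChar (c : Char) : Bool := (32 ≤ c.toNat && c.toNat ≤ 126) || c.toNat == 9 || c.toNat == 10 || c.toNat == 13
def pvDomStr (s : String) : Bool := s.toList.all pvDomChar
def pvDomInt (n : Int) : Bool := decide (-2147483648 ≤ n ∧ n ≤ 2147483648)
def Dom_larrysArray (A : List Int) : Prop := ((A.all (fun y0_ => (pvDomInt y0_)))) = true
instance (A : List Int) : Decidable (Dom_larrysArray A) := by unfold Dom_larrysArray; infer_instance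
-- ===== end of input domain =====

-- B replaces A's nested-loop inversion count with a merge sort that counts inversions; same YES/NO parity answer.

-- ===== PORT A =====
def larrysArray (A : List Int) : String :=
  let n : Int := A.length
  let count : Int :=
    (PySem.List.pyRange 0 n 1).foldl (fun count i =>
      (PySem.List.pyRange 0 i 1).foldl (fun count j =>
        if PySem.List.pyGetD A j 0 > PySem.List.pyGetD A i 0 then count + 1 else count) count) 0
  if PySem.Int.mod count 2 == 0 then "YES" else "NO"

-- ===== PORT B =====
-- the merge loop of Source B: while both halves are nonempty take the smaller head; taking from the
-- right half adds the number of elements remaining in the left half (len(left) - i); the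
-- leftovers of either half are appended unchanged
def mergeCount : List Int → List Int → List Int × Int
  | [], r => (r, 0)
  | a :: l, [] => (a :: l, 0)
  | a :: l, b :: r =>
    if a ≤ b then
      let p := mergeCount l (b :: r)
      (a :: p.1, p.2)
    else
      let p := mergeCount (a :: l) r
      (b :: p.1, p.2 + ((a :: l).length : Int))
termination_by l r => l.length + r.length

-- Source B's sort_count: split at n // 2, recurse on both halves, merge counting cross inversions
def sortCount (xs : List Int) : List Int × Int :=
  if _h : xs.length < 2 then (xs, 0)
  else
    let mid := xs.length / 2
    let p1 := sortCount (xs.take mid)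
    let p2 := sortCount (xs.drop mid)
    let p := mergeCount p1.1 p2.1
    (p.1, p1.2 + p2.2 + p.2)
termination_by xs.length
decreasing_by
  · simp only [List.length_take]; omega
  · simp only [List.length_drop]; omega

def larrysArray_alt (A : List Int) : String :=
  let p := sortCount A
  if PySem.Int.mod p.2 2 == 0 then "YES" else "NO"

-- ===== PRECONDITION & SPEC =====
def Spec_larrysArray (A : List Int) (out : String) : Prop := out = larrysArray_alt A
instance (A : List Int) (out : String) : Decidable (Spec_larrysArray A out) := by unfold Spec_larrysArray; infer_instance

-- ===== CLAIM (what is proved, stated in full; the proofs are below) =====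
def Claim_equal_larrysArray : Prop := ∀ (A : List Int), Dom_larrysArray A → Spec_larrysArray A (larrysArray A)

-- ===== LEMMAS AND PROOFS =====

-- number of inversions (pairs out of order), by head recursion
def invCount : List Int → Nat
  | [] => 0
  | x :: xs => xs.countP (fun y => decide (y < x)) + invCount xs

-- cross inversions between a left and a right block
def cross (l r : List Int) : Nat := (r.map (fun b => l.countP (fun a => decide (b < a)))).sum

theorem cross_cons_left (a : Int) (l r : List Int) :
    cross (a :: l) r = r.countP (fun b => decide (b < a)) + cross l r := by
  induction r with
  | nil => simp [cross]
  | cons b r ih =>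
      simp only [cross, List.map_cons, List.sum_cons, List.countP_cons] at *
      omega

theorem cross_cons_right (b : Int) (l r : List Int) :
    cross l (b :: r) = l.countP (fun a => decide (b < a)) + cross l r := by
  simp [cross]

theorem cross_perm_left {l l' : List Int} (h : l.Perm l') (r : List Int) :
    cross l r = cross l' r := by
  simp only [cross]
  congr 1
  exact List.map_congr_left (fun b _ => h.countP_eq _)

theorem cross_perm_right {r r' : List Int} (l : List Int) (h : r.Perm r') :
    cross l r = cross l r' :=
  (h.map _).sum_eq

theorem invCount_append (l r : List Int) :
    invCount (l ++ r) = invCount l + invCount r + cross l r := by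
  induction l with
  | nil => simp [invCount, cross]
  | cons a l ih =>
      simp only [List.cons_append, invCount, List.countP_append, ih, cross_cons_left]
      ring

theorem invCount_snoc (A : List Int) (x : Int) :
    invCount (A ++ [x]) = invCount A + A.countP (fun y => decide (x < y)) := by
  induction A with
  | nil => simp [invCount]
  | cons a A ih =>
      simp only [List.cons_append, invCount, List.countP_append, List.countP_cons, ih]
      simp only [List.countP_nil]
      omega

theorem mergeCount_perm (l r : List Int) : (mergeCount l r).1.Perm (l ++ r) := by
  fun_induction mergeCount l r with
  | case1 r => simp
  | case2 a l => simp
  | case3 a l b r h p ih => simpa [p] using ih.cons a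
  | case4 a l b r h p ih =>
      simp only [p] at ih ⊢
      exact (ih.cons b).trans List.perm_middle.symm

theorem mergeCount_sorted (l r : List Int) :
    l.Pairwise (· ≤ ·) → r.Pairwise (· ≤ ·) → (mergeCount l r).1.Pairwise (· ≤ ·) := by
  fun_induction mergeCount l r with
  | case1 r => exact fun _ h => h
  | case2 a l => exact fun h _ => h
  | case3 a l b r h p ih =>
      intro hl hr
      rw [List.pairwise_cons] at hl
      simp only [p, List.pairwise_cons]
      refine ⟨?_, ih hl.2 hr⟩
      intro y hy
      have hy' := (mergeCount_perm l (b :: r)).subset hy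
      rcases List.mem_append.mp hy' with h1 | h1
      · exact hl.1 y h1
      · rcases List.mem_cons.mp h1 with rfl | h2
        · exact h
        · exact le_trans h ((List.pairwise_cons.mp hr).1 y h2)
  | case4 a l b r h p ih =>
      intro hl hr
      rw [List.pairwise_cons] at hr
      simp only [p, List.pairwise_cons]
      refine ⟨?_, ih hl hr.2⟩
      intro y hy
      have hy' := (mergeCount_perm (a :: l) r).subset hy
      rcases List.mem_append.mp hy' with h1 | h1
      · rcases List.mem_cons.mp h1 with rfl | h2
        · omega
        · have := (List.pairwise_cons.mp hl).1 y h2; omega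
      · exact hr.1 y h1

theorem mergeCount_count (l r : List Int) :
    l.Pairwise (· ≤ ·) → r.Pairwise (· ≤ ·) → (mergeCount l r).2 = (cross l r : Int) := by
  fun_induction mergeCount l r with
  | case1 r => intro _ _; simp [cross]
  | case2 a l => intro _ _; simp [cross]
  | case3 a l b r h p ih =>
      intro hl hr
      rw [List.pairwise_cons] at hl
      have hz : (b :: r).countP (fun y => decide (y < a)) = 0 := by
        rw [List.countP_eq_zero]
        intro y hy
        rcases List.mem_cons.mp hy with rfl | h2
        · simpa using not_lt.mpr h
        · have := (List.pairwise_cons.mp hr).1 y h2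
          simpa using by omega
      simp only [p, cross_cons_left, hz, ih hl.2 hr, Nat.zero_add]
  | case4 a l b r h p ih =>
      intro hl hr
      rw [List.pairwise_cons] at hr
      have hfull : (a :: l).countP (fun x => decide (b < x)) = (a :: l).length := by
        rw [List.countP_eq_length]
        intro y hy
        rcases List.mem_cons.mp hy with rfl | h2
        · simpa using by omega
        · have := (List.pairwise_cons.mp hl).1 y h2
          simpa using by omega
      simp only [p, cross_cons_right, hfull, ih hl hr.2]
      push_cast
      ring

theorem sortCount_spec (xs : List Int) :
    (sortCount xs).1.Perm xs ∧ (sortCount xs).1.Pairwise (· ≤ ·) ∧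
      (sortCount xs).2 = (invCount xs : Int) := by
  fun_induction sortCount xs with
  | case1 xs h =>
      match xs, h with
      | [], _ => simp [invCount]
      | [x], _ => simp [invCount]
  | case2 xs h mid p1 p2 p ih1 ih2 =>
      obtain ⟨hp1, hs1, hc1⟩ := ih1
      obtain ⟨hp2, hs2, hc2⟩ := ih2
      have hsplit : xs.take mid ++ xs.drop mid = xs := List.take_append_drop mid xs
      refine ⟨?_, ?_, ?_⟩
      · simp only [p]
        exact (mergeCount_perm p1.1 p2.1).trans ((hp1.append hp2).trans (by rw [hsplit]))
      · exact mergeCount_sorted _ _ hs1 hs2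
      · simp only [p]
        rw [mergeCount_count _ _ hs1 hs2, hc1, hc2,
            cross_perm_left hp1, cross_perm_right _ hp2]
        have hx : invCount xs = invCount (xs.take mid) + invCount (xs.drop mid) +
            cross (xs.take mid) (xs.drop mid) := by
          conv_lhs => rw [← hsplit]
          exact invCount_append _ _
        rw [hx]
        push_cast
        ring

theorem pyGetD_append_left (A : List Int) (x : Int) {i : Int} (h0 : 0 ≤ i) (h1 : i < A.length) :
    PySem.List.pyGetD (A ++ [x]) i 0 = PySem.List.pyGetD A i 0 := by
  rw [PySem.List.pyGetD_eq_getElem _ _ h0 (by simp; omega),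
      PySem.List.pyGetD_eq_getElem _ _ h0 h1,
      List.getElem_append_left]

theorem pyGetD_append_length (A : List Int) (x : Int) :
    PySem.List.pyGetD (A ++ [x]) (A.length : Int) 0 = x := by
  rw [PySem.List.pyGetD_eq_getElem _ _ (by omega) (by simp)]
  simp

-- A's double loop computes the inversion count
theorem countFold_eq_invCount (A : List Int) :
    (PySem.List.pyRange 0 (A.length : Int) 1).foldl (fun count i =>
      (PySem.List.pyRange 0 i 1).foldl (fun count j =>
        if PySem.List.pyGetD A j 0 > PySem.List.pyGetD A i 0 then count + 1 else count) count) 0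
      = (invCount A : Int) := by
  induction A using List.reverseRecOn with
  | nil => simp [invCount]
  | append_singleton A x ih =>
      have hlen : ((A ++ [x]).length : Int) = (A.length : Int) + 1 := by simp
      rw [hlen, PySem.List.pyRange_one_succ_right (by positivity), List.foldl_append]
      have houter :
          (PySem.List.pyRange 0 (A.length : Int) 1).foldl (fun count i =>
            (PySem.List.pyRange 0 i 1).foldl (fun count j =>
              if PySem.List.pyGetD (A ++ [x]) j 0 > PySem.List.pyGetD (A ++ [x]) i 0 then count + 1 else count) count) (0 : Int)
          = (PySem.List.pyRange 0 (A.length : Int) 1).foldl (fun count i =>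
            (PySem.List.pyRange 0 i 1).foldl (fun count j =>
              if PySem.List.pyGetD A j 0 > PySem.List.pyGetD A i 0 then count + 1 else count) count) (0 : Int) := by
        apply PySem.List.foldl_congr_mem
        intro acc i hi
        obtain ⟨hi0, hi1⟩ := PySem.List.mem_pyRange_one.mp hi
        apply PySem.List.foldl_congr_mem
        intro acc2 j hj
        obtain ⟨hj0, hj1⟩ := PySem.List.mem_pyRange_one.mp hj
        rw [pyGetD_append_left A x hi0 hi1, pyGetD_append_left A x hj0 (by omega)]
      simp only [List.foldl_cons, List.foldl_nil]
      rw [houter, ih]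
      rw [pyGetD_append_length]
      have hinner :
          (PySem.List.pyRange 0 (A.length : Int) 1).foldl (fun count j =>
            if PySem.List.pyGetD (A ++ [x]) j 0 > x then count + 1 else count) ((invCount A : Int))
          = (PySem.List.pyRange 0 (A.length : Int) 1).foldl (fun count j =>
            if x < PySem.List.pyGetD A j 0 then count + 1 else count) ((invCount A : Int)) := by
        apply PySem.List.foldl_congr_mem
        intro acc j hj
        obtain ⟨hj0, hj1⟩ := PySem.List.mem_pyRange_one.mp hj
        rw [pyGetD_append_left A x hj0 hj1]
      rw [hinner]
      have := PySem.List.foldl_pyRange_zero_pyGetD A 0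
        (fun (acc : Int) (y : Int) => if x < y then acc + 1 else acc) ((invCount A : Int))
      simp only [PySem.List.len_eq] at this
      rw [this]
      have h2 := PySem.List.foldl_count_if (fun y => decide (x < y)) A ((invCount A : Int))
      simp only [decide_eq_true_eq] at h2
      rw [h2, invCount_snoc]
      push_cast
      ring

-- ===== VERDICT (by name: the statement is the Claim_ definition above) =====
theorem larrysArray_spec : Claim_equal_larrysArray := by
  intro A _
  unfold Spec_larrysArray larrysArray larrysArray_alt
  simp only [countFold_eq_invCount A, (sortCount_spec A).2.2]
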